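-- pv_equiv track=rewrite | github.com/mm3509/b9122 | 3-assignments/assignment-5/solution_6_gross_value_triplets_msfe.py | find_triplets_fast
-- ===== SOURCE A (Python) =====
-- def find_triplets_fast(alist):
--     """
--     >>> find_triplets_fast([-5, 3, 9, 4])
--     21
--     >>> find_triplets_fast(123)
--     Traceback (most recent call last):
--     ...
--     AssertionError...
--     """
--
--     assert isinstance(alist, list)
--     assert all(isinstance(x, int) for x in alist)
--
--     n = len(alist)
--
--     prefix = [0] * (n + 1)
--     for idx in range(n):
--         prefix[idx + 1] = prefix[idx] + alist[idx]
--
--     best_left = [0] * (n + 1)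
--     best_left[0] = prefix[0]
--     for j in range(1, n + 1):
--         best_left[j] = max(best_left[j - 1], prefix[j])
--
--     best_right = [0] * (n + 1)
--     best_right[n] = prefix[n]
--     for j in range(n - 1, -1, -1):
--         best_right[j] = max(best_right[j + 1], prefix[j])
--
--     max_f = None
--     for j in range(n + 1):
--         value = best_left[j] - prefix[j] + best_right[j]
--         if max_f is None or value > max_f:
--             max_f = value
--
--     maximum = 2 * max_f - prefix[n]
--     return maximum
-- ===== SOURCE B (Python) =====
-- def find_triplets_fast(alist):
--     assert isinstance(alist, list)
--     assert all(isinstance(x, int) for x in alist)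
--
--     prefix = [0]
--     for x in alist:
--         prefix.append(prefix[-1] + x)
--
--     values = [max(prefix[:j + 1]) - prefix[j] + max(prefix[j:])
--               for j in range(len(alist) + 1)]
--     return 2 * max(values) - prefix[-1]
-- ===== Notes on version B (the rewrite author's own statement) =====
-- stated objective: alternative
-- what changed: Replaces A's three index-mutated DP arrays (best_left/best_right running maxima plus a None-sentinel scan) with a direct search: per split point j it rescans the prefix-sum slices max(prefix[:j+1]) and max(prefix[j:]) in a comprehension and takes one built-in max.
import Mathlib
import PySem

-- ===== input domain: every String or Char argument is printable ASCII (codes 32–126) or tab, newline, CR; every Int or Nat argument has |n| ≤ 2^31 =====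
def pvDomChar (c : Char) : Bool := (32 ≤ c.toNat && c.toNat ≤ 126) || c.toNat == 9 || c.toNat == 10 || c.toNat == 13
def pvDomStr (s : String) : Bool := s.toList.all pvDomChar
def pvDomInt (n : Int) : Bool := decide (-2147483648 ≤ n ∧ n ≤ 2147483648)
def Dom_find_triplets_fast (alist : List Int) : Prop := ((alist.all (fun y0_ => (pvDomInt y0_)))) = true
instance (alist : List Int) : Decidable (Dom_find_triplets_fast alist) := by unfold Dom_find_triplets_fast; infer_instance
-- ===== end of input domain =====

-- B replaces A's three index-mutated DP arrays (best_left/best_right running maxima and a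
-- None-sentinel scan) by a direct per-split rescan of the prefix-sum slices; alternative
-- decomposition, not faster.


-- ===== PORT A =====
-- literal port: the two asserts always hold on a List Int input; list-cell mutation
-- prefix[i] = v becomes List.set; every index Python uses is provably in range, so
-- List.getD i 0 reads exactly the cell Python reads.
def find_triplets_fast (alist : List Int) : Int :=
  let n := alist.length
  let pfx := (List.range n).foldl
    (fun p idx => p.set (idx + 1) (p.getD idx 0 + alist.getD idx 0))
    (List.replicate (n + 1) 0)
  let bl := (List.range' 1 n).foldl
    (fun b j => b.set j (max (b.getD (j - 1) 0) (pfx.getD j 0)))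
    ((List.replicate (n + 1) 0).set 0 (pfx.getD 0 0))
  let br := ((List.range n).reverse).foldl
    (fun b j => b.set j (max (b.getD (j + 1) 0) (pfx.getD j 0)))
    ((List.replicate (n + 1) 0).set n (pfx.getD n 0))
  let max_f := (List.range (n + 1)).foldl
    (fun (m : Option Int) j =>
      let value := bl.getD j 0 - pfx.getD j 0 + br.getD j 0
      match m with
      | none => some value
      | some m0 => if value > m0 then some value else some m0)
    none
  match max_f with
  | some m => 2 * m - pfx.getD n 0
  | none => 0   -- unreachable: range(n+1) is nonempty, so max_f is never None

-- ===== PORT B =====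
-- Python max of a nonempty int list (every list it is applied to here is nonempty;
-- the [] default is unreachable).
def pyMax (l : List Int) : Int :=
  match l with
  | [] => 0
  | x :: xs => xs.foldl max x

def find_triplets_fast_alt (alist : List Int) : Int :=
  let pre := alist.foldl (fun p x => p ++ [p.getLastD 0 + x]) [0]
  let values := (List.range (alist.length + 1)).map
    (fun j => pyMax (pre.take (j + 1)) - pre.getD j 0 + pyMax (pre.drop j))
  2 * pyMax values - pre.getLastD 0

-- ===== PRECONDITION & SPEC =====
def Spec_find_triplets_fast (alist : List Int) (out : Int) : Prop := out = find_triplets_fast_alt alist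
instance (alist : List Int) (out : Int) : Decidable (Spec_find_triplets_fast alist out) := by unfold Spec_find_triplets_fast; infer_instance

-- ===== CLAIM (what is proved, stated in full; the proofs are below) =====
def Claim_equal_find_triplets_fast : Prop := ∀ (alist : List Int), Dom_find_triplets_fast alist → Spec_find_triplets_fast alist (find_triplets_fast alist)

-- ===== LEMMAS AND PROOFS =====

-- S al j = sum of the first j elements (Python's prefix[j])
def S (al : List Int) (j : Nat) : Int := (al.take j).sum

-- running maxima of prefix sums: left (indices 0..j) and right (indices j..n)
def BLv (al : List Int) (j : Nat) : Int := pyMax ((List.range (j + 1)).map (S al))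
def BRv (al : List Int) (j : Nat) : Int :=
  pyMax ((List.range' j (al.length + 1 - j)).map (S al))

theorem foldl_max_max (t : List Int) (a b : Int) :
    t.foldl max (max a b) = max a (t.foldl max b) := by
  induction t generalizing b with
  | nil => rfl
  | cons c t ih => simp only [List.foldl_cons, max_assoc, ih]

theorem pyMax_concat (l : List Int) (a : Int) (h : l ≠ []) :
    pyMax (l ++ [a]) = max (pyMax l) a := by
  cases l with
  | nil => simp at h
  | cons x xs => simp [pyMax, List.foldl_append]

theorem pyMax_cons (a : Int) (l : List Int) (h : l ≠ []) :
    pyMax (a :: l) = max a (pyMax l) := by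
  cases l with
  | nil => simp at h
  | cons b t => simp [pyMax, foldl_max_max]

theorem drop_range (n m : Nat) (h : m ≤ n) :
    (List.range n).drop m = List.range' m (n - m) := by
  have h1 : List.range' 0 m ++ List.range' (0 + 1 * m) (n - m) = List.range' 0 (m + (n - m)) :=
    List.range'_append
  simp only [Nat.zero_add, Nat.one_mul] at h1
  have h2 : m + (n - m) = n := by omega
  rw [h2] at h1
  rw [List.range_eq_range', ← h1, List.drop_append_of_le_length (by simp),
    List.drop_of_length_le (by simp), List.nil_append]

theorem range_succ_cons (n : Nat) : List.range (n + 1) = 0 :: List.range' 1 n := by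
  rw [List.range_eq_range', List.range'_succ]

theorem range'_concat_one (s k : Nat) : List.range' s (k + 1) = List.range' s k ++ [s + k] := by
  have := List.range'_concat (s := s) (n := k) (step := 1); simpa using this

theorem getD_set (l : List Int) (i : Nat) (v : Int) (j : Nat) :
    (l.set i v).getD j 0 = if i = j ∧ i < l.length then v else l.getD j 0 := by
  by_cases hij : i = j
  · subst hij
    by_cases hl : i < l.length
    · simp [List.getD_eq_getElem?_getD, hl]
    · rw [List.set_eq_of_length_le (by omega)]
      simp [hl]
  · simp [List.getD_eq_getElem?_getD, hij]

theorem getD_replicate_zero (n j : Nat) : (List.replicate n (0 : Int)).getD j 0 = 0 := by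
  simp [List.getD_eq_getElem?_getD, List.getElem?_replicate]
  split_ifs <;> rfl

theorem getD_map_range (f : Nat → Int) (n j : Nat) (h : j < n) :
    ((List.range n).map f).getD j 0 = f j := by
  simp [List.getD_eq_getElem?_getD, h]

theorem S_zero (al : List Int) : S al 0 = 0 := by simp [S]

theorem S_succ (al : List Int) (k : Nat) (h : k < al.length) :
    S al (k + 1) = S al k + al.getD k 0 := by
  unfold S
  rw [List.sum_take_succ al k h]
  simp [List.getD_eq_getElem?_getD, List.getElem?_eq_getElem h]

theorem BLv_zero (al : List Int) : BLv al 0 = S al 0 := by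
  simp [BLv, List.range_one, pyMax]

theorem BLv_succ (al : List Int) (k : Nat) :
    BLv al (k + 1) = max (BLv al k) (S al (k + 1)) := by
  unfold BLv
  rw [List.range_succ, List.map_append, List.map_cons, List.map_nil,
    pyMax_concat _ _ (by simp)]

theorem BRv_last (al : List Int) : BRv al al.length = S al al.length := by
  unfold BRv
  simp [List.range'_one, pyMax]

theorem BRv_succ (al : List Int) (m : Nat) (h : m < al.length) :
    BRv al m = max (BRv al (m + 1)) (S al m) := by
  unfold BRv
  have h1 : al.length + 1 - m = (al.length - m) + 1 := by omega
  have h2 : al.length + 1 - (m + 1) = al.length - m := by omega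
  rw [h1, List.range'_succ, List.map_cons, pyMax_cons, h2, max_comm]
  have : al.length - m ≠ 0 := by omega
  simp [List.range'_eq_nil_iff, this]

-- A's prefix array, pointwise
theorem prefA_inv (al : List Int) (k : Nat) (hk : k ≤ al.length) :
    (((List.range k).foldl (fun p idx => p.set (idx + 1) (p.getD idx 0 + al.getD idx 0))
      (List.replicate (al.length + 1) 0)).length = al.length + 1)
    ∧ ∀ j, ((List.range k).foldl (fun p idx => p.set (idx + 1) (p.getD idx 0 + al.getD idx 0))
      (List.replicate (al.length + 1) 0)).getD j 0
        = if j ≤ k ∧ j ≤ al.length then S al j else 0 := by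
  induction k with
  | zero =>
    refine ⟨by simp, fun j => ?_⟩
    rw [List.range_zero, List.foldl_nil, getD_replicate_zero]
    split_ifs with h
    · obtain ⟨h1, _⟩ := h
      interval_cases j
      simp [S_zero]
    · rfl
  | succ k ih =>
    obtain ⟨ihl, ihd⟩ := ih (by omega)
    rw [List.range_succ, List.foldl_append, List.foldl_cons, List.foldl_nil]
    refine ⟨by rw [List.length_set]; exact ihl, fun j => ?_⟩
    rw [getD_set, ihl]
    by_cases hj : j = k + 1
    · subst hj
      rw [if_pos ⟨rfl, by omega⟩, ihd, if_pos ⟨le_refl k, by omega⟩,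
        if_pos ⟨le_refl _, hk⟩, S_succ al k (by omega)]
    · rw [if_neg (by omega), ihd]
      split_ifs <;> first | rfl | omega

-- A's best_left array, pointwise
theorem blA_inv (al : List Int) (p : List Int)
    (hp : ∀ j, j ≤ al.length → p.getD j 0 = S al j) (k : Nat) (hk : k ≤ al.length) :
    (((List.range' 1 k).foldl (fun b j => b.set j (max (b.getD (j - 1) 0) (p.getD j 0)))
      ((List.replicate (al.length + 1) 0).set 0 (p.getD 0 0))).length = al.length + 1)
    ∧ ∀ j, ((List.range' 1 k).foldl (fun b j => b.set j (max (b.getD (j - 1) 0) (p.getD j 0)))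
      ((List.replicate (al.length + 1) 0).set 0 (p.getD 0 0))).getD j 0
        = if j ≤ k ∧ j ≤ al.length then BLv al j else 0 := by
  induction k with
  | zero =>
    refine ⟨by simp, fun j => ?_⟩
    rw [List.range'_zero, List.foldl_nil, getD_set, getD_replicate_zero]
    by_cases hj : j = 0
    · subst hj
      rw [if_pos ⟨rfl, by simp⟩, if_pos ⟨le_refl 0, by omega⟩, BLv_zero, hp 0 (by omega)]
    · rw [if_neg (by simp; omega), if_neg (by omega)]
  | succ k ih =>
    obtain ⟨ihl, ihd⟩ := ih (by omega)
    rw [range'_concat_one, List.foldl_append, List.foldl_cons, List.foldl_nil]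
    have h1k : 1 + k = k + 1 := by omega
    rw [h1k]
    refine ⟨by rw [List.length_set]; exact ihl, fun j => ?_⟩
    rw [getD_set, ihl]
    by_cases hj : j = k + 1
    · subst hj
      rw [if_pos ⟨rfl, by omega⟩, Nat.add_sub_cancel, ihd,
        if_pos ⟨le_refl k, by omega⟩, hp (k + 1) hk,
        if_pos ⟨le_refl _, hk⟩, BLv_succ]
    · rw [if_neg (by omega), ihd]
      split_ifs <;> first | rfl | omega

-- A's best_right array, pointwise
theorem brA_inv (al : List Int) (p : List Int)
    (hp : ∀ j, j ≤ al.length → p.getD j 0 = S al j) (m : Nat) (hm : m ≤ al.length)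
    (st : List Int) (hlen : st.length = al.length + 1)
    (hst : ∀ j, j ≤ al.length → st.getD j 0 = if m ≤ j then BRv al j else 0) :
    ((((List.range m).reverse).foldl
        (fun b j => b.set j (max (b.getD (j + 1) 0) (p.getD j 0))) st).length = al.length + 1)
    ∧ ∀ j, j ≤ al.length →
      (((List.range m).reverse).foldl
        (fun b j => b.set j (max (b.getD (j + 1) 0) (p.getD j 0))) st).getD j 0 = BRv al j := by
  induction m generalizing st with
  | zero =>
    refine ⟨by simpa using hlen, fun j hj => ?_⟩
    rw [List.range_zero, List.reverse_nil, List.foldl_nil, hst j hj, if_pos (by omega)]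
  | succ m ih =>
    rw [List.range_succ, List.reverse_append, List.reverse_singleton, List.singleton_append,
      List.foldl_cons]
    apply ih (by omega)
    · simp [hlen]
    · intro j hj
      rw [getD_set, hst j hj]
      by_cases hjm : j = m
      · subst hjm
        rw [if_pos ⟨rfl, by omega⟩, if_pos (by omega)]
        rw [hst (j + 1) (by omega), if_pos (by omega), hp j (by omega),
          (BRv_succ al j (by omega)).symm]
      · rw [if_neg (by omega)]
        split_ifs with h1 h2 <;> first | rfl | omega

-- the None-sentinel max loop, once started
theorem optfold (bl p br : List Int) (l : List Nat) (m0 : Int) :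
    l.foldl (fun (m : Option Int) j =>
      let value := bl.getD j 0 - p.getD j 0 + br.getD j 0
      match m with
      | none => some value
      | some m1 => if value > m1 then some value else some m1) (some m0)
    = some (l.foldl (fun m j => max m (bl.getD j 0 - p.getD j 0 + br.getD j 0)) m0) := by
  induction l generalizing m0 with
  | nil => rfl
  | cons a t ih =>
    simp only [List.foldl_cons]
    by_cases h : bl.getD a 0 - p.getD a 0 + br.getD a 0 > m0
    · show t.foldl _ (if bl.getD a 0 - p.getD a 0 + br.getD a 0 > m0 then _ else _) = _
      rw [if_pos h, ih, max_eq_right h.le]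
    · show t.foldl _ (if bl.getD a 0 - p.getD a 0 + br.getD a 0 > m0 then _ else _) = _
      rw [if_neg h, ih, max_eq_left (by omega)]

theorem foldl_max_congr (l : List Nat) (v u : Nat → Int) (x : Int)
    (h : ∀ j ∈ l, v j = u j) :
    l.foldl (fun m j => max m (v j)) x = l.foldl (fun m j => max m (u j)) x := by
  induction l generalizing x with
  | nil => rfl
  | cons a t ih =>
    simp only [List.foldl_cons]
    rw [h a (by simp), ih _ (fun j hj => h j (by simp [hj]))]

-- B's prefix list is the map of prefix sums
theorem preB_eq (al : List Int) :
    al.foldl (fun p x => p ++ [p.getLastD 0 + x]) [0]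
      = (List.range (al.length + 1)).map (S al) := by
  induction al using List.reverseRecOn with
  | nil => simp [S]
  | append_singleton al x ih =>
    rw [List.foldl_append, ih, List.foldl_cons, List.foldl_nil]
    have hlast : ((List.range (al.length + 1)).map (S al)).getLastD 0 = S al al.length := by
      rw [List.range_succ, List.map_append]
      exact List.getLastD_concat ..
    rw [hlast]
    have hlen : (al ++ [x]).length = al.length + 1 := by simp
    rw [hlen, List.range_succ (n := al.length + 1), List.map_append]
    congr 1
    · apply List.map_congr_left
      intro j hj
      rw [List.mem_range] at hj
      unfold S
      rw [List.take_append_of_le_length (by omega)]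
    · unfold S
      rw [List.take_of_length_le (by simp)]
      simp [List.take_of_length_le]

theorem getLastD_map_range (f : Nat → Int) (n : Nat) :
    ((List.range (n + 1)).map f).getLastD 0 = f n := by
  rw [List.range_succ, List.map_append]
  exact List.getLastD_concat ..

theorem main_eq (al : List Int) : find_triplets_fast al = find_triplets_fast_alt al := by
  simp only [find_triplets_fast, find_triplets_fast_alt]
  rw [preB_eq al]
  set P : List Int := (List.range al.length).foldl
    (fun p idx => p.set (idx + 1) (p.getD idx 0 + al.getD idx 0))
    (List.replicate (al.length + 1) 0) with hP
  set BL : List Int := (List.range' 1 al.length).foldl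
    (fun b j => b.set j (max (b.getD (j - 1) 0) (P.getD j 0)))
    ((List.replicate (al.length + 1) 0).set 0 (P.getD 0 0)) with hBL
  set BR : List Int := ((List.range al.length).reverse).foldl
    (fun b j => b.set j (max (b.getD (j + 1) 0) (P.getD j 0)))
    ((List.replicate (al.length + 1) 0).set al.length (P.getD al.length 0)) with hBR
  -- pointwise facts about A's arrays
  have hPfacts := prefA_inv al al.length le_rfl
  rw [← hP] at hPfacts
  obtain ⟨hPl, hPd⟩ := hPfacts
  have hp : ∀ j, j ≤ al.length → P.getD j 0 = S al j := by
    intro j hj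
    rw [hPd j, if_pos ⟨hj, hj⟩]
  have hBLfacts := blA_inv al P hp al.length le_rfl
  rw [← hBL] at hBLfacts
  obtain ⟨hBLl, hBLd⟩ := hBLfacts
  have hBRfacts := brA_inv al P hp al.length le_rfl
    ((List.replicate (al.length + 1) 0).set al.length (P.getD al.length 0))
    (by simp)
    (by
      intro j hj
      rw [getD_set, getD_replicate_zero, List.length_replicate]
      by_cases hjn : j = al.length
      · subst hjn
        rw [if_pos ⟨rfl, by omega⟩, if_pos (le_refl _), hp al.length (le_refl _), BRv_last]
      · rw [if_neg (by omega), if_neg (by omega)])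
  rw [← hBR] at hBRfacts
  obtain ⟨hBRl, hBRd⟩ := hBRfacts
  -- the values list on B's side
  have hvals : (List.range (al.length + 1)).map
      (fun j => pyMax (((List.range (al.length + 1)).map (S al)).take (j + 1)) -
        ((List.range (al.length + 1)).map (S al)).getD j 0 +
        pyMax (((List.range (al.length + 1)).map (S al)).drop j))
      = (List.range (al.length + 1)).map (fun j => BLv al j - S al j + BRv al j) := by
    apply List.map_congr_left
    intro j hj
    rw [List.mem_range] at hj
    rw [← List.map_take, List.take_range, Nat.min_eq_left (by omega),
      getD_map_range _ _ _ (by omega), ← List.map_drop, drop_range _ _ (by omega)]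
    rfl
  rw [hvals, getLastD_map_range, hp al.length le_rfl]
  -- A's max_f loop
  rw [range_succ_cons, List.foldl_cons, List.map_cons]
  have hpyc : ∀ (a : Int) (l : List Int), pyMax (a :: l) = l.foldl max a := fun _ _ => rfl
  rw [hpyc, List.foldl_map]
  rw [optfold BL P BR]
  have hcongr := foldl_max_congr (List.range' 1 al.length)
    (fun j => BL.getD j 0 - P.getD j 0 + BR.getD j 0)
    (fun j => BLv al j - S al j + BRv al j)
    (BL.getD 0 0 - P.getD 0 0 + BR.getD 0 0)
    (by
      intro j hj
      rw [List.mem_range'_1] at hj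
      beta_reduce
      rw [hBLd j, if_pos ⟨by omega, by omega⟩, hp j (by omega), hBRd j (by omega)])
  rw [hcongr]
  have h0 : BL.getD 0 0 - P.getD 0 0 + BR.getD 0 0 = BLv al 0 - S al 0 + BRv al 0 := by
    rw [hBLd 0, if_pos ⟨by omega, by omega⟩, hp 0 (by omega), hBRd 0 (by omega)]
  rw [h0]

-- ===== VERDICT (by name: the statement is the Claim_ definition above) =====
theorem find_triplets_fast_spec : Claim_equal_find_triplets_fast := by
  intro al _
  exact main_eq al
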